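-- pv_equiv track=rewrite | github.com/Dev9269/password-cracker-toolkit | gpu/hashcat_wrapper.py | _convert_charset_to_hashcat
-- ===== SOURCE A (Python) =====
-- def _convert_charset_to_hashcat(charset):
--     """
--     Convert our charset representation to hashcat charset format.
--
--     Args:
--         charset (str): Character set string
--
--     Returns:
--         str: Hashcat-compatible charset string
--     """
--     # Define hashcat charset placeholders
--     # ?l = lowercase letters
--     # ?u = uppercase letters
--     # ?d = digits
--     # ?s = special characters
--
--     has_lower = any(c.islower() for c in charset)
--     has_upper = any(c.isupper() for c in charset)
--     has_digit = any(c.isdigit() for c in charset)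
--     has_special = any(not c.isalnum() for c in charset)
--
--     hc_charset = ''
--     if has_lower:
--         hc_charset += '?l'
--     if has_upper:
--         hc_charset += '?u'
--     if has_digit:
--         hc_charset += '?d'
--     if has_special:
--         hc_charset += '?s'
--
--     # If no specific characteristics, use all
--     if not hc_charset:
--         hc_charset = '?l?u?d?s'
--
--     return hc_charset
-- ===== SOURCE B (Python) =====
-- _PARTS = ('?l', '?u', '?d', '?s')
-- # 16-entry lookup: mask -> placeholder string; entry 0 is the all-classes fallback.
-- _TABLE = [''.join(p for i, p in enumerate(_PARTS) if (m >> i) & 1) or '?l?u?d?s'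
--           for m in range(16)]
--
--
-- def _convert_charset_to_hashcat(charset):
--     mask = 0
--     for c in charset:
--         mask |= (c.islower()
--                  | (c.isupper() << 1)
--                  | (c.isdigit() << 2)
--                  | ((not c.isalnum()) << 3))
--     return _TABLE[mask]
-- ===== Notes on version B (the rewrite author's own statement) =====
-- stated objective: alternative
-- what changed: Replaces four any(...) scans plus an if-chain of string concatenations by a bitmask fold (each character contributes a 4-bit class mask OR-ed into an accumulator) and a single precomputed 16-entry lookup table whose entry 0 is the '?l?u?d?s' fallback.
import Mathlib
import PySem

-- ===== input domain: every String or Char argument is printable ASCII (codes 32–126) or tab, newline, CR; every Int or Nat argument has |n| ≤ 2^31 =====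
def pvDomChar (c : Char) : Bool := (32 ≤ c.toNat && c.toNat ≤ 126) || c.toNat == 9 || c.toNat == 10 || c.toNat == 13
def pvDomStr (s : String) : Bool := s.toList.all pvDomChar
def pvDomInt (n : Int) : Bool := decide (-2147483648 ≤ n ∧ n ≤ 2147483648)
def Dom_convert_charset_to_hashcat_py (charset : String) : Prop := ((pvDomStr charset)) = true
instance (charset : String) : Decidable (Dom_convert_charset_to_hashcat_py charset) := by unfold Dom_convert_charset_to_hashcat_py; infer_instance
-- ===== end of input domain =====

-- ===== PORT A =====
-- B replaces A's four any() scans + if-chain by a bitmask fold and a 16-entry lookup table (objective: alternative).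
def convert_charset_to_hashcat_py (charset : String) : String :=
  let has_lower := charset.toList.any (fun c => PySem.Chars.islower c)
  let has_upper := charset.toList.any (fun c => PySem.Chars.isupper c)
  let has_digit := charset.toList.any (fun c => PySem.Chars.isdigit c)
  let has_special := charset.toList.any (fun c => !PySem.Chars.isalnum c)
  let hc := ""
  let hc := if has_lower then hc ++ "?l" else hc
  let hc := if has_upper then hc ++ "?u" else hc
  let hc := if has_digit then hc ++ "?d" else hc
  let hc := if has_special then hc ++ "?s" else hc
  if hc = "" then "?l?u?d?s" else hc

-- ===== PORT B =====
-- the 16-entry table built as in Source B: mask -> joined parts, empty entry replaced by '?l?u?d?s'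
def pvParts : List String := ["?l", "?u", "?d", "?s"]

def pvTable : List String :=
  (List.range 16).map (fun m =>
    let s := PySem.Str.join ""
      ((pvParts.zipIdx).filterMap (fun p => if (m >>> p.2) % 2 = 1 then some p.1 else none))
    if s = "" then "?l?u?d?s" else s)

def convert_charset_to_hashcat_py_alt (charset : String) : String :=
  let mask := charset.toList.foldl
    (fun (m : Nat) c =>
      m ||| ((if PySem.Chars.islower c then 1 else 0) |||
             ((if PySem.Chars.isupper c then 1 else 0) <<< 1) |||
             ((if PySem.Chars.isdigit c then 1 else 0) <<< 2) |||
             ((if !PySem.Chars.isalnum c then 1 else 0) <<< 3))) 0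
  pvTable.getD mask ""

-- ===== PRECONDITION & SPEC =====
def Spec_convert_charset_to_hashcat_py (charset : String) (out : String) : Prop := out = convert_charset_to_hashcat_py_alt charset
instance (charset : String) (out : String) : Decidable (Spec_convert_charset_to_hashcat_py charset out) := by unfold Spec_convert_charset_to_hashcat_py; infer_instance

-- ===== CLAIM (what is proved, stated in full; the proofs are below) =====
def Claim_equal_convert_charset_to_hashcat_py : Prop := ∀ (charset : String), Dom_convert_charset_to_hashcat_py charset → Spec_convert_charset_to_hashcat_py charset (convert_charset_to_hashcat_py charset)

-- ===== LEMMAS AND PROOFS =====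
-- encoding of the four class flags as the 4-bit mask B accumulates
def pvEnc (a b c d : Bool) : Nat :=
  (if a then 1 else 0) + (if b then 2 else 0) + (if c then 4 else 0) + (if d then 8 else 0)

lemma pvEnc_or (a b c d la ua da sa : Bool) :
    pvEnc a b c d |||
      ((if la then 1 else 0) ||| ((if ua then 1 else 0) <<< 1) |||
       ((if da then 1 else 0) <<< 2) ||| ((if sa then 1 else 0) <<< 3))
    = pvEnc (a || la) (b || ua) (c || da) (d || sa) := by
  cases a <;> cases b <;> cases c <;> cases d <;>
    cases la <;> cases ua <;> cases da <;> cases sa <;> decide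

lemma mask_foldl (l : List Char) (a b c d : Bool) :
    l.foldl
      (fun (m : Nat) ch =>
        m ||| ((if PySem.Chars.islower ch then 1 else 0) |||
               ((if PySem.Chars.isupper ch then 1 else 0) <<< 1) |||
               ((if PySem.Chars.isdigit ch then 1 else 0) <<< 2) |||
               ((if !PySem.Chars.isalnum ch then 1 else 0) <<< 3))) (pvEnc a b c d)
    = pvEnc (a || l.any (fun ch => PySem.Chars.islower ch))
            (b || l.any (fun ch => PySem.Chars.isupper ch))
            (c || l.any (fun ch => PySem.Chars.isdigit ch))
            (d || l.any (fun ch => !PySem.Chars.isalnum ch)) := by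
  induction l generalizing a b c d with
  | nil => simp
  | cons x xs ih =>
      rw [List.foldl_cons, pvEnc_or, ih]
      simp [Bool.or_assoc]

lemma mask_foldl_zero (l : List Char) :
    l.foldl
      (fun (m : Nat) ch =>
        m ||| ((if PySem.Chars.islower ch then 1 else 0) |||
               ((if PySem.Chars.isupper ch then 1 else 0) <<< 1) |||
               ((if PySem.Chars.isdigit ch then 1 else 0) <<< 2) |||
               ((if !PySem.Chars.isalnum ch then 1 else 0) <<< 3))) 0
    = pvEnc (l.any (fun ch => PySem.Chars.islower ch))
            (l.any (fun ch => PySem.Chars.isupper ch))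
            (l.any (fun ch => PySem.Chars.isdigit ch))
            (l.any (fun ch => !PySem.Chars.isalnum ch)) := by
  have h := mask_foldl l false false false false
  simpa using h

-- ===== VERDICT (by name: the statement is the Claim_ definition above) =====
theorem convert_charset_to_hashcat_py_spec : Claim_equal_convert_charset_to_hashcat_py := by
  intro charset _
  unfold Spec_convert_charset_to_hashcat_py convert_charset_to_hashcat_py convert_charset_to_hashcat_py_alt
  rw [mask_foldl_zero]
  cases h1 : charset.toList.any (fun c => PySem.Chars.islower c) <;>
  cases h2 : charset.toList.any (fun c => PySem.Chars.isupper c) <;>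
  cases h3 : charset.toList.any (fun c => PySem.Chars.isdigit c) <;>
  cases h4 : charset.toList.any (fun c => !PySem.Chars.isalnum c) <;>
    decide
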